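-- pv_equiv track=rewrite | github.com/DaniLopez23/LiveBall-App | backend/utils/compute_pass_receiver_player.py | add_pass_receiver_info
-- ===== SOURCE A (Python) =====
-- from typing import Any, Dict, List
--
-- def _is_pass_event(event: Dict[str, Any]) -> bool:
--     """Check if event is a pass event (type_id = 1)."""
--     return event.get("type_id") == "1"
--
-- def _find_next_team_event(
--     events: List[Dict[str, Any]],
--     current_index: int,
--     team_id: str
-- ) -> Dict[str, Any] | None:
--     """Find the next event from the same team after current index."""
--     for i in range(current_index + 1, len(events)):
--         event = events[i]
--         if event.get("team_id") == team_id: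
--             return event
--     return None
--
-- def add_pass_receiver_info(events: List[Dict[str, Any]]) -> List[Dict[str, Any]]:
--     """
--     Add player_receiver_id to pass events based on the next event of the same team.
--
--     Processes ALL events (accumulative), assigning receiver only to passes that don't have one yet.
--
--     Args:
--         events: List of ALL event dictionaries (accumulative from XML)
--
--     Returns:
--         Same list of events with player_receiver_id added to pass events (modifies in-place)
--     """
--     pass_count = 0
--     passes_with_receiver = 0
--     passes_updated = 0
--
--     for index, event in enumerate(events):
--         # Si es un evento de pase
--         if _is_pass_event(event):
--             pass_count += 1
--
--             # Si ya tiene receiver, lo omitimos y seguimos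
--             if event.get("player_receiver_id"):
--                 passes_with_receiver += 1
--                 continue
--
--             # Buscar el siguiente evento del mismo equipo
--             team_id = event.get("team_id")
--             next_team_event = _find_next_team_event(events, index, team_id)
--
--             if next_team_event:
--                 receiver_id = next_team_event.get("player_id")
--                 event["player_receiver_id"] = receiver_id
--                 passes_with_receiver += 1
--                 passes_updated += 1
--
--     if passes_updated > 0:
--         # logger.debug(f"✓ Updated {passes_updated} pass events with receiver info (total with receiver: {passes_with_receiver}/{pass_count})")
--         pass
--     return events
-- ===== SOURCE B (Python) =====
-- from typing import Any, Dict, List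
--
--
-- def add_pass_receiver_info(events: List[Dict[str, Any]]) -> List[Dict[str, Any]]:
--     """Single backward pass keeping, per team_id, the nearest following event.
--
--     Returns a new list of (possibly copied) event dicts; does not mutate its input.
--     """
--     next_by_team: Dict[Any, Dict[str, Any]] = {}
--     out: List[Dict[str, Any]] = []
--     for event in reversed(events):
--         new_event = event
--         if event.get("type_id") == "1" and not event.get("player_receiver_id"):
--             follower = next_by_team.get(event.get("team_id"))
--             if follower:
--                 new_event = dict(event)
--                 new_event["player_receiver_id"] = follower.get("player_id")
--         out.append(new_event)
--         next_by_team[event.get("team_id")] = event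
--     out.reverse()
--     return out
-- ===== Notes on version B (the rewrite author's own statement) =====
-- stated objective: alternative
-- what changed: A's per-pass forward scan for the next same-team event is replaced by a single backward pass that keeps a dict mapping each team_id to the nearest following event, and B returns a fresh list instead of mutating the input dicts in place.
import Mathlib
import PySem

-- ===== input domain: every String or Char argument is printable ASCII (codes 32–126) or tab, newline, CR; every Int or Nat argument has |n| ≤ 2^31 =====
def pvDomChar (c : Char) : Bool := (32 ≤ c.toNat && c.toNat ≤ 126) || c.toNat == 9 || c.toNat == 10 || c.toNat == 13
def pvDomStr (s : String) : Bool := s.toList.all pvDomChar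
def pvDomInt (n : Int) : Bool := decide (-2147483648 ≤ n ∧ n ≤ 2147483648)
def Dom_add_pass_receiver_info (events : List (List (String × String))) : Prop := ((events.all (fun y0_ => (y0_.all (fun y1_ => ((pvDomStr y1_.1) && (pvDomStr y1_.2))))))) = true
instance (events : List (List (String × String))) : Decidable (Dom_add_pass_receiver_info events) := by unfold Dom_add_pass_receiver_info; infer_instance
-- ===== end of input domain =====

-- B replaces A's per-pass forward scan by one backward pass keeping, per team_id, the nearest
-- following event.  A mutates its argument's dicts in place and returns the same list; B returns
-- a fresh list: the equivalence proved here is about the return value only.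

-- ===== PORT A =====

-- event.get(k) on an association-list dict (first match)
def pvGet (e : List (String × String)) (k : String) : Option String :=
  (PySem.Dict.mk e).get? k

-- Python truthiness of event.get(k): false for None and for ""
def pvTruthy : Option String → Bool
  | none => false
  | some s => s ≠ ""

-- _is_pass_event
def pvIsPass (e : List (String × String)) : Bool := pvGet e "type_id" == some "1"

-- the 'for i in range(current_index+1, len(events))' loop body of _find_next_team_event
def pvFindLoop (events : List (List (String × String))) (idxs : List Int)
    (team : Option String) : Option (List (String × String)) :=
  match idxs with
  | [] => none
  | i :: rest =>
    match PySem.List.pyGet? events i with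
    | some ev => if pvGet ev "team_id" == team then some ev else pvFindLoop events rest team
    | none => none   -- unreachable: range indices are in range

-- _find_next_team_event
def pvFindNext (events : List (List (String × String))) (current : Nat)
    (team : Option String) : Option (List (String × String)) :=
  pvFindLoop events (PySem.List.pyRange ((current : Int) + 1) (events.length : Int) 1) team

-- one iteration of A's main loop (acc is the list of events, mutated in place by Python)
def pvAStep (acc : List (List (String × String))) (index : Nat) : List (List (String × String)) :=
  let event := acc.getD index []
  if pvIsPass event then
    if pvTruthy (pvGet event "player_receiver_id") then acc
    else
      let team := pvGet event "team_id"
      match pvFindNext acc index team with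
      | some nxt =>
        if nxt ≠ [] then
          match pvGet nxt "player_id" with
          | some pid => acc.set index ((PySem.Dict.mk event).insert "player_receiver_id" pid).items
          | none => acc   -- Python stores None here (not a string); excluded by Pre_
        else acc
      | none => acc
  else acc

def add_pass_receiver_info (events : List (List (String × String))) : List (List (String × String)) :=
  (List.range events.length).foldl pvAStep events

-- ===== PORT B =====

-- one iteration of B's backward loop: state = (next_by_team, out)
def pvBStep (st : PySem.Dict (Option String) (List (String × String)) × List (List (String × String)))
    (event : List (String × String)) :
    PySem.Dict (Option String) (List (String × String)) × List (List (String × String)) :=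
  let nextByTeam := st.1
  let out := st.2
  let newEvent :=
    if pvIsPass event && !pvTruthy (pvGet event "player_receiver_id") then
      match nextByTeam.get? (pvGet event "team_id") with
      | some follower =>
        if follower ≠ [] then
          match pvGet follower "player_id" with
          | some pid => ((PySem.Dict.mk event).insert "player_receiver_id" pid).items
          | none => event   -- Python stores None here (not a string); excluded by Pre_
        else event
      | none => event
    else event
  (nextByTeam.insert (pvGet event "team_id") event, out.concat newEvent)

def add_pass_receiver_info_alt (events : List (List (String × String))) : List (List (String × String)) :=
  ((events.reverse.foldl pvBStep (PySem.Dict.empty, [])).2).reverse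

-- ===== PRECONDITION & SPEC =====
-- Pre_ excludes inputs on which Python A (and B alike) stores None — not a string, so not a value of
-- the declared dict type — as some pass event's player_receiver_id: a pass with no (truthy) receiver
-- whose first following same-team event is non-empty but lacks a "player_id" key.
def Pre_add_pass_receiver_info (events : List (List (String × String))) : Prop :=
  ∀ i ∈ List.range events.length, ∀ j ∈ List.range events.length, i < j →
    pvIsPass (events.getD i []) = true →
    pvTruthy (pvGet (events.getD i []) "player_receiver_id") = false →
    pvGet (events.getD j []) "team_id" = pvGet (events.getD i []) "team_id" →
    (∀ k ∈ List.range events.length, i < k → k < j →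
      pvGet (events.getD k []) "team_id" ≠ pvGet (events.getD i []) "team_id") →
    events.getD j [] ≠ [] →
    "player_id" ∈ (events.getD j []).map Prod.fst
instance (events : List (List (String × String))) : Decidable (Pre_add_pass_receiver_info events) := by
  unfold Pre_add_pass_receiver_info; infer_instance

def pvWitness_add_pass_receiver_info : (List (List (String × String))) :=
  [[("type_id", "1"), ("team_id", "a"), ("player_id", "p1")],
   [("team_id", "a"), ("player_id", "p2")]]

def Spec_add_pass_receiver_info (events : List (List (String × String))) (out : List (List (String × String))) : Prop := out = add_pass_receiver_info_alt events
instance (events : List (List (String × String))) (out : List (List (String × String))) : Decidable (Spec_add_pass_receiver_info events out) := by unfold Spec_add_pass_receiver_info; infer_instance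

-- ===== CLAIM (what is proved, stated in full; the proofs are below) =====
def Claim_equal_add_pass_receiver_info : Prop := ∀ (events : List (List (String × String))), Dom_add_pass_receiver_info events → Pre_add_pass_receiver_info events → Spec_add_pass_receiver_info events (add_pass_receiver_info events)

-- ===== LEMMAS AND PROOFS =====
set_option maxRecDepth 10000

-- the common specification both ports are reduced to --

-- the receiver-source for a pass of team t: first later event of team t,
-- falling back to the initial dict (Dict.empty for the real run)
def pvLook (n0 : PySem.Dict (Option String) (List (String × String)))
    (rest : List (List (String × String))) (t : Option String) : Option (List (String × String)) :=
  (rest.find? (fun x => pvGet x "team_id" == t)).or (n0.get? t)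

def pvTransform (n0 : PySem.Dict (Option String) (List (String × String)))
    (e : List (String × String)) (rest : List (List (String × String))) : List (String × String) :=
  if pvIsPass e && !pvTruthy (pvGet e "player_receiver_id") then
    match pvLook n0 rest (pvGet e "team_id") with
    | some nxt =>
      if nxt ≠ [] then
        match pvGet nxt "player_id" with
        | some pid => ((PySem.Dict.mk e).insert "player_receiver_id" pid).items
        | none => e
      else e
    | none => e
  else e

def pvSpecW (n0 : PySem.Dict (Option String) (List (String × String))) :
    List (List (String × String)) → List (List (String × String))
  | [] => []
  | e :: rest => pvTransform n0 e rest :: pvSpecW n0 rest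

theorem pvSpecW_length (n0) (l : List (List (String × String))) : (pvSpecW n0 l).length = l.length := by
  induction l with
  | nil => rfl
  | cons e rest ih => simp [pvSpecW, ih]

theorem pvSpecW_getElem (n0) (l : List (List (String × String))) (k : Nat) (h : k < l.length) :
    (pvSpecW n0 l)[k]'(by rw [pvSpecW_length]; exact h) = pvTransform n0 l[k] (l.drop (k + 1)) := by
  induction l generalizing k with
  | nil => simp at h
  | cons e rest ih =>
    cases k with
    | zero => simp [pvSpecW]
    | succ k => simpa [pvSpecW] using ih k (by simpa using h)

-- B equals the specification --

theorem pvB_invariant (l : List (List (String × String))) (n0) (out0) :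
    (∀ t, ((l.reverse.foldl pvBStep (n0, out0)).1).get? t = pvLook n0 l t) ∧
    (l.reverse.foldl pvBStep (n0, out0)).2 = out0 ++ (pvSpecW n0 l).reverse := by
  induction l generalizing out0 with
  | nil => simp [pvLook, pvSpecW]
  | cons e rest ih =>
    have hfold : (e :: rest).reverse.foldl pvBStep (n0, out0)
        = pvBStep (rest.reverse.foldl pvBStep (n0, out0)) e := by
      simp [List.foldl_append]
    obtain ⟨ih1, ih2⟩ := ih out0
    constructor
    · intro t
      rw [hfold]
      show ((rest.reverse.foldl pvBStep (n0, out0)).1.insert (pvGet e "team_id") e).get? t = _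
      rw [PySem.Dict.get?_insert]
      by_cases ht : t = pvGet e "team_id"
      · rw [if_pos ht, ht]
        show _ = pvLook n0 (e :: rest) (pvGet e "team_id")
        unfold pvLook
        rw [List.find?_cons_of_pos (by simp)]
        simp
      · rw [if_neg ht, ih1 t]
        simp only [pvLook]
        rw [List.find?_cons_of_neg (by simp only [beq_iff_eq]; exact fun h => ht h.symm)]
    · rw [hfold]
      show _ = out0 ++ (pvSpecW n0 (e :: rest)).reverse
      simp only [pvBStep, ih1, ih2, pvSpecW, List.reverse_cons]
      simp [pvTransform, List.concat_eq_append, List.append_assoc]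

theorem pvB_eq_spec (events : List (List (String × String))) :
    add_pass_receiver_info_alt events = pvSpecW PySem.Dict.empty events := by
  unfold add_pass_receiver_info_alt
  rw [(pvB_invariant events PySem.Dict.empty []).2]
  simp

-- A equals the specification --

theorem pvFindLoop_eq (l : List (List (String × String))) (k : Nat) (team : Option String)
    (hk : k ≤ l.length) :
    pvFindLoop l (PySem.List.pyRange (k : Int) (l.length : Int) 1) team
      = (l.drop k).find? (fun x => pvGet x "team_id" == team) := by
  obtain ⟨d, hd⟩ : ∃ d, l.length - k = d := ⟨_, rfl⟩
  induction d generalizing k with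
  | zero =>
    have hkl : k = l.length := by omega
    subst hkl
    rw [PySem.List.pyRange_one_eq_nil (by omega)]
    simp [pvFindLoop]
  | succ d ih =>
    have hlt : k < l.length := by omega
    rw [PySem.List.pyRange_one_cons (by exact_mod_cast hlt)]
    have hget : PySem.List.pyGet? l (k : Int) = some (l[k]'hlt) := by
      rw [PySem.List.pyGet?_natCast]
      simp [List.getElem?_eq_getElem hlt]
    have hdrop : l.drop k = l[k]'hlt :: l.drop (k + 1) := List.drop_eq_getElem_cons hlt
    rw [hdrop]
    simp only [pvFindLoop, hget, List.find?_cons]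
    by_cases hmatch : (pvGet (l[k]'hlt) "team_id" == team) = true
    · simp [hmatch]
    · simp only [hmatch, Bool.false_eq_true, if_false]
      have : ((k : Int) + 1) = ((k + 1 : Nat) : Int) := by push_cast; ring
      rw [this, ih (k + 1) (by omega) (by omega)]

theorem pvA_set_at (S : List (List (String × String))) (events : List (List (String × String)))
    (k : Nat) (hk : k < events.length) (hSk : k ≤ S.length) (v : List (String × String)) :
    (S.take k ++ events.drop k).set k v = S.take k ++ v :: events.drop (k + 1) := by
  have hlen : (S.take k).length = k := by simp [Nat.min_eq_left hSk]
  rw [List.set_append_right _ _ (by omega), hlen, Nat.sub_self, List.drop_eq_getElem_cons hk,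
    List.set_cons_zero]

theorem pvA_invariant (events : List (List (String × String))) (k : Nat) (hk : k ≤ events.length) :
    (List.range k).foldl pvAStep events
      = (pvSpecW PySem.Dict.empty events).take k ++ events.drop k := by
  induction k with
  | zero => simp
  | succ k ih =>
    have hklt : k < events.length := by omega
    have hS : (pvSpecW PySem.Dict.empty events).length = events.length := pvSpecW_length _ _
    rw [List.range_succ, List.foldl_append, ih (by omega), List.foldl_cons, List.foldl_nil]
    set S := pvSpecW PySem.Dict.empty events with hSdef
    have hkS : k ≤ S.length := by omega
    have hacc_get : (S.take k ++ events.drop k).getD k [] = events[k]'hklt := by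
      rw [List.getD_eq_getElem?_getD, List.getElem?_append_right (by simp [Nat.min_eq_left hkS])]
      simp [List.length_take, Nat.min_eq_left hkS, List.getElem?_drop,
        List.getElem?_eq_getElem hklt]
    have hacc_len : (S.take k ++ events.drop k).length = events.length := by
      simp [List.length_take, Nat.min_eq_left hkS]
      omega
    have hlen : (S.take k).length = k := by simp [Nat.min_eq_left hkS]
    have hacc_drop : (S.take k ++ events.drop k).drop (k + 1) = events.drop (k + 1) := by
      rw [List.drop_append, List.drop_eq_nil_of_le (by omega), hlen]
      simp [List.drop_drop]
    have hfind : pvFindNext (S.take k ++ events.drop k) k (pvGet (events[k]'hklt) "team_id")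
        = pvLook PySem.Dict.empty (events.drop (k + 1)) (pvGet (events[k]'hklt) "team_id") := by
      unfold pvFindNext
      have hcast : ((k : Int) + 1) = ((k + 1 : Nat) : Int) := by push_cast; ring
      rw [hcast, pvFindLoop_eq _ (k + 1) _ (by rw [hacc_len]; omega), hacc_drop]
      simp [pvLook, PySem.Dict.get?_empty]
    have hSgk : S[k]'(by rw [hS]; omega) = pvTransform PySem.Dict.empty (events[k]'hklt) (events.drop (k + 1)) :=
      pvSpecW_getElem _ _ k hklt
    have htake : S.take (k + 1) = S.take k ++ [S[k]'(by rw [hS]; omega)] :=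
      List.take_succ_eq_append_getElem (by rw [hS]; omega)
    unfold pvAStep
    simp only [hacc_get, hfind]
    rw [htake, hSgk]
    unfold pvTransform
    have hunch : S.take k ++ events.drop k
        = S.take k ++ [events[k]'hklt] ++ events.drop (k + 1) := by
      rw [List.append_assoc, List.singleton_append, ← List.drop_eq_getElem_cons hklt]
    by_cases hpass : pvIsPass (events[k]'hklt) = true
    · by_cases hrecv : pvTruthy (pvGet (events[k]'hklt) "player_receiver_id") = true
      · rw [if_pos hpass, if_pos hrecv, if_neg (by simp [hrecv])]
        exact hunch
      · have hand : (pvIsPass (events[k]'hklt)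
            && !pvTruthy (pvGet (events[k]'hklt) "player_receiver_id")) = true := by
          simp only [hpass, Bool.true_and, Bool.not_eq_true']
          simpa using hrecv
        rw [if_pos hpass, if_neg hrecv, if_pos hand]
        cases hlook : pvLook PySem.Dict.empty (events.drop (k + 1)) (pvGet (events[k]'hklt) "team_id") with
        | none => simp [← List.drop_eq_getElem_cons hklt]
        | some nxt =>
          dsimp only
          by_cases hne : nxt ≠ []
          · rw [if_pos hne, if_pos hne]
            cases hpid : pvGet nxt "player_id" with
            | some pid => simp [pvA_set_at S events k hklt hkS]
            | none => simp [← List.drop_eq_getElem_cons hklt]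
          · rw [if_neg hne, if_neg hne]
            exact hunch
    · rw [if_neg hpass, if_neg (by simp [hpass])]
      exact hunch

theorem pvA_eq_spec (events : List (List (String × String))) :
    add_pass_receiver_info events = pvSpecW PySem.Dict.empty events := by
  unfold add_pass_receiver_info
  rw [pvA_invariant events events.length (le_refl _)]
  simp [List.take_of_length_le (le_of_eq (pvSpecW_length _ _))]

-- ===== VERDICT (by name: the statement is the Claim_ definition above) =====
theorem add_pass_receiver_info_spec : Claim_equal_add_pass_receiver_info := by
  intro events _ _
  unfold Spec_add_pass_receiver_info
  rw [pvA_eq_spec, pvB_eq_spec]
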